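-- pv_equiv track=rewrite | github.com/AlexRogalskiy/AcurusTrack | utils/utils_pandas_df.py | clean_update_indexes_rule
-- ===== SOURCE A (Python) =====
-- def clean_update_indexes_rule(intersected_rule):
--     """ Choose bijection. There are some cases when part of the tracks
--     processed different in different windows because of the context.
--     So in replace rule one indexes may correspond two or more indexes. We choose only one-to-one rule.
--
--     """
--     cleared_inds = {}
--     for key in intersected_rule.keys():
--         if len(intersected_rule[key]) == 1:  # consider one-to-one
--             cleared_inds[key] = intersected_rule[key]
--     inv_dict = {}
--     for k, v in cleared_inds.items():
--         new_key = list(v)[0]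
--         if new_key not in inv_dict:
--             inv_dict[new_key] = []
--         inv_dict[new_key].append(k)
--     for k, v in inv_dict.items():
--         if len(v) > 1:
--             for ind in v:
--                 del cleared_inds[ind]
--     return cleared_inds
-- ===== SOURCE B (Python) =====
-- def clean_update_indexes_rule(intersected_rule):
--     cleaned = {}
--     owner = {}  # target -> key currently claiming it, None once duplicated
--     for k, v in intersected_rule.items():
--         if len(v) == 1:
--             t = list(v)[0]
--             if t not in owner:
--                 owner[t] = k
--                 cleaned[k] = v
--             else:
--                 prev = owner[t]
--                 if prev is not None:
--                     del cleaned[prev]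
--                     owner[t] = None
--     return cleaned
-- ===== Notes on version B (the rewrite author's own statement) =====
-- stated objective: alternative
-- what changed: A makes three staged passes (build the singleton sub-dict, invert it into a dict of key-lists, then delete every key of each multi-element group); B is a single online pass that keeps a running owner map from target to claiming key and, on the first collision, evicts the previously kept entry and marks the target as duplicated.
import Mathlib
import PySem

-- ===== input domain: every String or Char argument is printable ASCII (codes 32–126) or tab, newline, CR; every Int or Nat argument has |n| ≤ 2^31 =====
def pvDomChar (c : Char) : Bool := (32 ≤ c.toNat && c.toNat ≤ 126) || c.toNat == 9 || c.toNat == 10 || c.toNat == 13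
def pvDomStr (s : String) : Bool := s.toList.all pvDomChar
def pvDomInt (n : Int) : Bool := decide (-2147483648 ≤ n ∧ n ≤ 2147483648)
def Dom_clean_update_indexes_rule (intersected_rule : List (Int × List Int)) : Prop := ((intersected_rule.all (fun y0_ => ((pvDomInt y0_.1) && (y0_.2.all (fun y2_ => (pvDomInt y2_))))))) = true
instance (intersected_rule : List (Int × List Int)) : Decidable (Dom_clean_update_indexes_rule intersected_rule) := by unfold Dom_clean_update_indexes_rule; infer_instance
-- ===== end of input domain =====

-- B replaces A's three staged passes (build singleton dict, invert it, delete grouped keys) by one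
-- online pass that evicts a kept entry the moment its target collides; same return value.

-- ===== PORT A =====
def clean_update_indexes_rule (intersected_rule : List (Int × List Int)) : List (Int × List Int) :=
  let d := PySem.Dict.ofList intersected_rule
  -- cleared_inds = {}: for key in d.keys(): if len(d[key]) == 1: cleared_inds[key] = d[key]
  let cleared := d.keys.foldl (fun c k =>
      if (d.getD k []).length == 1 then c.insert k (d.getD k []) else c)
    (PySem.Dict.empty : PySem.Dict Int (List Int))
  -- inv_dict = {}: for k, v in cleared.items(): …
  let inv := cleared.items.foldl (fun inv p =>
      let new_key := PySem.List.pyGetD p.2 0 0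
      let inv1 := if inv.contains new_key then inv else inv.insert new_key ([] : List Int)
      inv1.modify new_key [] (fun l => l ++ [p.1]))
    (PySem.Dict.empty : PySem.Dict Int (List Int))
  -- for k, v in inv.items(): if len(v) > 1: for ind in v: del cleared[ind]
  let final := inv.items.foldl (fun c q =>
      if 1 < q.2.length then q.2.foldl (fun c ind => c.erase ind) c else c) cleared
  final.items

-- ===== PORT B =====
def clean_update_indexes_rule_alt (intersected_rule : List (Int × List Int)) : List (Int × List Int) :=
  let d := PySem.Dict.ofList intersected_rule
  -- cleaned = {}; owner = {}; one pass: for k, v in d.items(): …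
  let st := d.items.foldl (fun st p =>
      if p.2.length == 1 then
        let t := PySem.List.pyGetD p.2 0 0
        if !(st.2.contains t) then
          (st.1.insert p.1 p.2, st.2.insert t (some p.1))
        else
          match st.2.getD t none with
          | some prev => (st.1.erase prev, st.2.insert t none)
          | none => st
      else st)
    ((PySem.Dict.empty : PySem.Dict Int (List Int)),
     (PySem.Dict.empty : PySem.Dict Int (Option Int)))
  st.1.items

-- ===== PRECONDITION & SPEC =====
def Spec_clean_update_indexes_rule (intersected_rule : List (Int × List Int)) (out : List (Int × List Int)) : Prop := out = clean_update_indexes_rule_alt intersected_rule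
instance (intersected_rule : List (Int × List Int)) (out : List (Int × List Int)) : Decidable (Spec_clean_update_indexes_rule intersected_rule out) := by unfold Spec_clean_update_indexes_rule; infer_instance

-- ===== CLAIM (what is proved, stated in full; the proofs are below) =====
def Claim_equal_clean_update_indexes_rule : Prop := ∀ (intersected_rule : List (Int × List Int)), Dom_clean_update_indexes_rule intersected_rule → Spec_clean_update_indexes_rule intersected_rule (clean_update_indexes_rule intersected_rule)

-- ===== LEMMAS AND PROOFS =====

def pvNk (p : Int × List Int) : Int := PySem.List.pyGetD p.2 0 0

-- the common characterization both ports are proved equal to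
def pvKept (S : List (Int × List Int)) : List (Int × List Int) :=
  S.filter (fun q => (S.map pvNk).count (pvNk q) == 1)

-- ---------- A-side ----------

lemma erase_fold_items (ks : List Int) (c : PySem.Dict Int (List Int)) :
    (ks.foldl (fun c i => c.erase i) c).items
      = c.items.filter (fun p => !(ks.contains p.1)) := by
  induction ks generalizing c with
  | nil => simp
  | cons k ks ih =>
      rw [List.foldl_cons, ih]
      show List.filter _ (c.erase k).items = _
      simp only [PySem.Dict.erase, List.filter_filter]
      apply List.filter_congr; intro p _
      by_cases hpk : p.1 = k <;> simp [hpk]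

lemma groups_fold_items (gs : List (Int × List Int)) (c : PySem.Dict Int (List Int)) :
    (gs.foldl (fun c q => if 1 < q.2.length then q.2.foldl (fun c i => c.erase i) c else c) c).items
      = c.items.filter (fun p => !(((gs.filter (fun q => decide (1 < q.2.length))).flatMap (fun q => q.2)).contains p.1)) := by
  induction gs generalizing c with
  | nil => simp
  | cons q gs ih =>
      by_cases h : 1 < q.2.length
      · rw [List.foldl_cons, if_pos h, ih, erase_fold_items, List.filter_filter,
          List.filter_cons_of_pos (by simpa using h), List.flatMap_cons]
        apply List.filter_congr; intro p _
        by_cases h1 : p.1 ∈ q.2 <;> simp [h1, List.mem_append]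
      · rw [List.foldl_cons, if_neg h, ih, List.filter_cons_of_neg (by simpa using h)]

lemma inv_step_eq (inv : PySem.Dict Int (List Int)) (p : Int × List Int) :
    (let new_key := PySem.List.pyGetD p.2 0 0
     let inv1 := if inv.contains new_key then inv else inv.insert new_key ([] : List Int)
     inv1.modify new_key [] (fun l => l ++ [p.1]))
      = inv.modify (pvNk p) [] (fun l => l ++ [p.1]) := by
  show (if inv.contains (pvNk p) then inv else inv.insert (pvNk p) []).modify (pvNk p) [] _ = _
  by_cases h : inv.contains (pvNk p)
  · rw [if_pos h]
  · rw [if_neg h]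
    have hg : inv.getD (pvNk p) [] = [] := PySem.Dict.getD_of_not_contains inv [] (by simpa using h)
    simp only [PySem.Dict.modify, PySem.Dict.getD_insert_self, PySem.Dict.insert_insert_self, hg]

lemma group_getD (S : List (Int × List Int)) (c : Int) :
    ((S.map (fun p => (pvNk p, p.1))).foldl
        (fun d q => d.modify q.1 [] (fun l => l ++ [q.2])) PySem.Dict.empty).getD c []
      = (S.filter (fun p => pvNk p == c)).map Prod.fst := by
  rw [PySem.Dict.getD_foldl_modify_append, PySem.Dict.getD_empty, List.nil_append,
    List.filter_map, List.map_map]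
  rfl

lemma group_len (S : List (Int × List Int)) (c : Int) :
    ((S.filter (fun p => pvNk p == c)).map Prod.fst).length = (S.map pvNk).count c := by
  rw [List.length_map, List.count_eq_countP, List.countP_map, ← List.countP_eq_length_filter]
  rfl

lemma mem_K_iff (S : List (Int × List Int)) (hnd : (S.map Prod.fst).Nodup)
    (p : Int × List Int) (hp : p ∈ S) :
    (p.1 ∈ ((((S.map (fun p => (pvNk p, p.1))).foldl
          (fun d q => d.modify q.1 [] (fun l => l ++ [q.2])) PySem.Dict.empty).items.filter
            (fun q => decide (1 < q.2.length))).flatMap (fun q => q.2))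
      ↔ 1 < (S.map pvNk).count (pvNk p)) := by
  have hkempty : (PySem.Dict.empty : PySem.Dict Int (List Int)).keys.Nodup := by
    rw [PySem.Dict.keys_empty]; exact List.nodup_nil
  have hnodupk : (((S.map (fun p => (pvNk p, p.1))).foldl
      (fun d q => d.modify q.1 [] (fun l => l ++ [q.2])) PySem.Dict.empty)).keys.Nodup :=
    PySem.Dict.nodup_keys_foldl_modify_key _ Prod.fst [] (fun _ q => fun l => l ++ [q.2]) _ hkempty
  have hkeys : (((S.map (fun p => (pvNk p, p.1))).foldl
      (fun d q => d.modify q.1 [] (fun l => l ++ [q.2])) PySem.Dict.empty)).keys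
      = PySem.Set.ofList ((S.map (fun p => (pvNk p, p.1))).map Prod.fst) := by
    rw [PySem.Dict.keys_foldl_modify_key _ Prod.fst [] (fun _ q => fun l => l ++ [q.2]),
      PySem.Dict.keys_empty, PySem.Set.update_nil_left]
  have hitems := PySem.Dict.items_eq_map_keys _ hnodupk ([] : List Int)
  constructor
  · intro hmem
    rcases List.mem_flatMap.1 hmem with ⟨q, hq, hpq⟩
    rcases List.mem_filter.1 hq with ⟨hqi, hqlen⟩
    rw [hitems] at hqi
    rcases List.mem_map.1 hqi with ⟨c, _, rfl⟩
    rw [group_getD] at hpq hqlen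
    rcases List.mem_map.1 hpq with ⟨p', hp', hfst⟩
    have hp'S := List.mem_of_mem_filter hp'
    have hc : pvNk p' = c := by simpa using (List.mem_filter.1 hp').2
    have : p' = p := List.inj_on_of_nodup_map hnd hp'S hp hfst
    subst this; subst hc
    rw [group_len] at hqlen
    simpa using hqlen
  · intro hcount
    apply List.mem_flatMap.2
    refine ⟨(pvNk p, (((S.map (fun p => (pvNk p, p.1))).foldl
        (fun d q => d.modify q.1 [] (fun l => l ++ [q.2])) PySem.Dict.empty)).getD (pvNk p) []), ?_, ?_⟩
    · apply List.mem_filter.2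
      constructor
      · rw [hitems]
        apply List.mem_map.2
        refine ⟨pvNk p, ?_, rfl⟩
        rw [hkeys]
        rw [PySem.Set.mem_ofList, List.map_map]
        exact List.mem_map.2 ⟨p, hp, rfl⟩
      · rw [group_getD, group_len]
        simpa using hcount
    · rw [group_getD]
      exact List.mem_map.2 ⟨p, List.mem_filter.2 ⟨hp, by simp⟩, rfl⟩

theorem A_eq_kept (r : List (Int × List Int)) :
    clean_update_indexes_rule r
      = pvKept ((PySem.Dict.ofList r).items.filter (fun p => p.2.length == 1)) := by
  unfold clean_update_indexes_rule pvKept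
  dsimp only
  have hk : (PySem.Dict.ofList r).keys.Nodup := PySem.Dict.nodup_keys_ofList r
  set d := PySem.Dict.ofList r with hd
  set S := d.items.filter (fun p => p.2.length == 1) with hS
  have hSnd : (S.map Prod.fst).Nodup := by
    have hsub : List.Sublist (S.map Prod.fst) (d.items.map Prod.fst) := (List.filter_sublist).map Prod.fst
    exact (show (d.items.map Prod.fst).Nodup from hk).sublist hsub
  have hclear : (d.keys.foldl (fun c k =>
      if (d.getD k []).length == 1 then c.insert k (d.getD k []) else c)
      (PySem.Dict.empty : PySem.Dict Int (List Int))).items = S := by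
    have h1 : d.keys.foldl (fun c k =>
        if (d.getD k []).length == 1 then c.insert k (d.getD k []) else c)
        (PySem.Dict.empty : PySem.Dict Int (List Int))
        = d.items.foldl (fun c p =>
            if p.2.length == 1 then c.insert p.1 p.2 else c) PySem.Dict.empty := by
      show (d.items.map Prod.fst).foldl _ _ = _
      rw [List.foldl_map]
      exact PySem.List.foldl_congr_mem _ _ _ _ (fun acc p hp => by
        rw [PySem.Dict.getD_of_mem_items d (k := p.1) (v := p.2) (by simpa using hp) hk])
    rw [h1, ← List.foldl_filter, ← hS,
      PySem.Dict.items_foldl_insert_fresh S Prod.fst Prod.snd _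
        (fun a _ => PySem.Dict.contains_empty _) hSnd]
    show PySem.Dict.empty.items ++ _ = _
    simp [PySem.Dict.empty]
  have hinv : S.foldl (fun inv p =>
      let new_key := PySem.List.pyGetD p.2 0 0
      let inv1 := if inv.contains new_key then inv else inv.insert new_key ([] : List Int)
      inv1.modify new_key [] (fun l => l ++ [p.1])) PySem.Dict.empty
      = (S.map (fun p => (pvNk p, p.1))).foldl
          (fun d q => d.modify q.1 [] (fun l => l ++ [q.2])) PySem.Dict.empty := by
    rw [List.foldl_map]
    exact PySem.List.foldl_congr_mem _ _ _ _ (fun acc p _ => inv_step_eq acc p)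
  rw [hclear, hinv, groups_fold_items, hclear]
  apply List.filter_congr
  intro p hp
  have hmem := mem_K_iff S hSnd p hp
  by_cases hgt : 1 < (S.map pvNk).count (pvNk p)
  · have h1 : p.1 ∈ _ := hmem.2 hgt
    rw [List.contains_eq_mem]
    simp only [h1, decide_true, Bool.not_true]
    symm
    rw [beq_eq_false_iff_ne]
    intro h
    omega
  · have hpos : 0 < (S.map pvNk).count (pvNk p) :=
      List.count_pos_iff.2 (List.mem_map.2 ⟨p, hp, rfl⟩)
    have hn1 : (S.map pvNk).count (pvNk p) = 1 := by omega
    have h0 : p.1 ∉ _ := fun h => hgt (hmem.1 h)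
    rw [List.contains_eq_mem]
    simp only [h0, decide_false, Bool.not_false]
    symm
    rw [beq_iff_eq]
    omega

-- ---------- B-side ----------

def pvBStep (st : PySem.Dict Int (List Int) × PySem.Dict Int (Option Int))
    (p : Int × List Int) : PySem.Dict Int (List Int) × PySem.Dict Int (Option Int) :=
  if !(st.2.contains (pvNk p)) then
    (st.1.insert p.1 p.2, st.2.insert (pvNk p) (some p.1))
  else
    match st.2.getD (pvNk p) none with
    | some prev => (st.1.erase prev, st.2.insert (pvNk p) none)
    | none => st

def pvOwnerSpec (S : List (Int × List Int)) (t : Int) : Option Int :=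
  if (S.map pvNk).count t == 1 then (S.find? (fun q => pvNk q == t)).map Prod.fst else none

lemma unique_of_count_one (S : List (Int × List Int)) (t : Int)
    (h1 : (S.map pvNk).count t = 1) {q q' : Int × List Int}
    (hq : q ∈ S) (hq' : q' ∈ S) (ht : pvNk q = t) (ht' : pvNk q' = t) : q = q' := by
  by_contra hne
  have hcard : 2 ≤ ((S.filter (fun p => pvNk p == t)).toFinset).card := by
    apply Finset.one_lt_card.2
    exact ⟨q, by simp [List.mem_toFinset, hq, ht],
           q', by simp [List.mem_toFinset, hq', ht'], hne⟩
  have hlen := List.toFinset_card_le (S.filter (fun p => pvNk p == t))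
  have := group_len S t
  rw [List.length_map] at this
  omega

lemma singleton_count (t b : Int) : [b].count t = if t = b then 1 else 0 := by
  simp only [List.count_cons, List.count_nil, Nat.zero_add]
  by_cases h : t = b <;> simp [h]
  exact fun hh => h hh.symm

lemma ownerSpec_append_ne (S : List (Int × List Int)) (p : Int × List Int) (t : Int)
    (ht : t ≠ pvNk p) : pvOwnerSpec (S ++ [p]) t = pvOwnerSpec S t := by
  unfold pvOwnerSpec
  have hcnt : ((S ++ [p]).map pvNk).count t = (S.map pvNk).count t := by
    rw [List.map_append, List.map_singleton, List.count_append, singleton_count,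
      if_neg ht, Nat.add_zero]
  have hfind : (S ++ [p]).find? (fun q => pvNk q == t) = S.find? (fun q => pvNk q == t) := by
    rw [List.find?_append]
    have hb : (pvNk p == t) = false := by
      rw [beq_eq_false_iff_ne]; exact fun h => ht h.symm
    have : [p].find? (fun q => pvNk q == t) = none := by
      simp [List.find?, hb]
    rw [this, Option.or_none]
  rw [hcnt, hfind]

lemma ownerSpec_append_self (S : List (Int × List Int)) (p : Int × List Int) :
    pvOwnerSpec (S ++ [p]) (pvNk p)
      = if (S.map pvNk).count (pvNk p) = 0 then some p.1 else none := by
  unfold pvOwnerSpec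
  have hcnt : ((S ++ [p]).map pvNk).count (pvNk p) = (S.map pvNk).count (pvNk p) + 1 := by
    rw [List.map_append, List.map_singleton, List.count_append, singleton_count, if_pos rfl]
  rw [hcnt]
  by_cases h0 : (S.map pvNk).count (pvNk p) = 0
  · rw [if_pos h0]
    have hfS : S.find? (fun q => pvNk q == pvNk p) = none := by
      rw [List.find?_eq_none]
      intro q hq hpred
      have : pvNk p ∈ S.map pvNk := List.mem_map.2 ⟨q, hq, by simpa [beq_iff_eq] using hpred⟩
      exact absurd (List.count_eq_zero.1 h0) (fun hn => hn this)
    rw [List.find?_append, hfS, Option.none_or]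
    simp [List.find?, h0]
  · rw [if_neg h0]
    simp [h0]

lemma online_inv (S : List (Int × List Int))
    (hnd : (S.map Prod.fst).Nodup) :
    (S.foldl pvBStep (PySem.Dict.empty, PySem.Dict.empty)).1.items = pvKept S
    ∧ ((S.foldl pvBStep (PySem.Dict.empty, PySem.Dict.empty)).2.contains
         = fun t => (S.map pvNk).contains t)
    ∧ (∀ t, (S.foldl pvBStep (PySem.Dict.empty, PySem.Dict.empty)).2.getD t none
         = pvOwnerSpec S t) := by
  induction S using List.reverseRecOn with
  | nil =>
      refine ⟨by simp [pvKept, PySem.Dict.empty], ?_, ?_⟩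
      · funext t; simp [PySem.Dict.contains_empty]
      · intro t; simp [pvOwnerSpec, PySem.Dict.getD_empty]
  | append_singleton S p ih =>
      rw [List.map_append, List.map_singleton, List.nodup_append] at hnd
      obtain ⟨hndS, -, hdisj⟩ := hnd
      have hp1 : p.1 ∉ S.map Prod.fst := fun h => hdisj _ h _ (List.mem_singleton_self _) rfl
      obtain ⟨hres, hcont, hgetD⟩ := ih hndS
      have hcnt' : ∀ t, ((S ++ [p]).map pvNk).count t
          = (S.map pvNk).count t + (if pvNk p = t then 1 else 0) := by
        intro t
        rw [List.map_append, List.map_singleton, List.count_append, singleton_count]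
        by_cases h : t = pvNk p
        · rw [if_pos h, if_pos h.symm]
        · rw [if_neg h, if_neg (Ne.symm h)]
      rw [List.foldl_append, List.foldl_cons, List.foldl_nil]
      set F := S.foldl pvBStep (PySem.Dict.empty, PySem.Dict.empty) with hF
      -- generic facts about the erased/inserted owner dict
      have hcontains_mem : ∀ t, F.2.contains t = ((S.map pvNk).contains t) := fun t => by
        rw [hcont]
      by_cases hc0 : (S.map pvNk).count (pvNk p) = 0
      · -- fresh target
        have hnotmem : pvNk p ∉ S.map pvNk := List.count_eq_zero.1 hc0
        have hcf : F.2.contains (pvNk p) = false := by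
          rw [hcontains_mem]
          simpa [List.contains_eq_mem] using hnotmem
        have hstep : pvBStep F p = (F.1.insert p.1 p.2, F.2.insert (pvNk p) (some p.1)) := by
          simp [pvBStep, hcf]
        rw [hstep]
        have hnewpred : ∀ q ∈ S,
            (((S ++ [p]).map pvNk).count (pvNk q) == 1) = ((S.map pvNk).count (pvNk q) == 1) := by
          intro q hq
          have hne : pvNk p ≠ pvNk q := fun h => hnotmem (h ▸ List.mem_map.2 ⟨q, hq, rfl⟩)
          rw [hcnt', if_neg hne, Nat.add_zero]
        have hkept' : pvKept (S ++ [p]) = pvKept S ++ [p] := by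
          unfold pvKept
          rw [List.filter_append, List.filter_congr hnewpred]
          congr 1
          simp [List.filter, hcnt', hc0]
        refine ⟨?_, ?_, ?_⟩
        · have hfresh : F.1.contains p.1 = false := by
            rw [Bool.eq_false_iff]
            intro hct
            have h1 : p.1 ∈ F.1.keys := (PySem.Dict.contains_iff_mem_keys _ _).1 hct
            have h2 : p.1 ∈ (pvKept S).map Prod.fst := by
              have hk : F.1.keys = F.1.items.map Prod.fst := rfl
              rw [hk, hres] at h1; exact h1
            exact hp1 (((List.filter_sublist).map Prod.fst).mem h2)
          rw [PySem.Dict.items_insert_of_not_contains _ _ hfresh, hres, hkept']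
        · funext t
          rw [PySem.Dict.contains_insert, hcontains_mem, List.map_append, List.map_singleton]
          by_cases h : t = pvNk p <;> by_cases hm : t ∈ List.map pvNk S <;>
            simp [h, hm, List.contains_eq_mem, List.mem_append]
        · intro t
          by_cases h : t = pvNk p
          · subst h
            rw [PySem.Dict.getD_insert_self, ownerSpec_append_self, if_pos hc0]
          · rw [PySem.Dict.getD_insert_of_ne _ _ _ h, hgetD, ownerSpec_append_ne _ _ _ h]
      · have hmem : pvNk p ∈ S.map pvNk :=
          List.count_pos_iff.1 (Nat.pos_of_ne_zero hc0)
        have hcf : F.2.contains (pvNk p) = true := by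
          rw [hcontains_mem]
          simpa [List.contains_eq_mem] using hmem
        by_cases hc1 : (S.map pvNk).count (pvNk p) = 1
        · -- second occurrence: evict the unique owner
          obtain ⟨q0, hq0find⟩ : ∃ q0, S.find? (fun q => pvNk q == pvNk p) = some q0 := by
            rcases List.mem_map.1 hmem with ⟨q, hq, hqt⟩
            cases hfs : S.find? (fun q => pvNk q == pvNk p) with
            | none =>
                exact absurd (beq_iff_eq.2 hqt) (by simpa using List.find?_eq_none.1 hfs q hq)
            | some q0 => exact ⟨q0, rfl⟩
          have hq0mem : q0 ∈ S := List.mem_of_find?_eq_some hq0find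
          have hq0t : pvNk q0 = pvNk p := by
            have := List.find?_some hq0find
            simpa [beq_iff_eq] using this
          have hown : F.2.getD (pvNk p) none = some q0.1 := by
            rw [hgetD]
            unfold pvOwnerSpec
            rw [if_pos (by simpa using hc1), hq0find]
            rfl
          have hstep : pvBStep F p = (F.1.erase q0.1, F.2.insert (pvNk p) none) := by
            simp [pvBStep, hcf, hown]
          rw [hstep]
          refine ⟨?_, ?_, ?_⟩
          · show (F.1.items.filter (fun x => !(x.1 == q0.1))) = _
            rw [hres]
            unfold pvKept
            rw [List.filter_filter, List.filter_append]
            have hpnot : [p].filter (fun q => ((S ++ [p]).map pvNk).count (pvNk q) == 1) = [] := by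
              simp [List.filter, hcnt', hc1]
            rw [hpnot, List.append_nil]
            apply List.filter_congr
            intro q hq
            by_cases ht : pvNk q = pvNk p
            · have hq0eq : q = q0 := unique_of_count_one S (pvNk p) hc1 hq hq0mem ht hq0t
              subst hq0eq
              rw [hcnt', if_pos ht.symm, ht, hc1]
              simp
            · have hkne : q.1 ≠ q0.1 := by
                intro hke
                exact ht ((List.inj_on_of_nodup_map hndS hq hq0mem hke) ▸ hq0t)
              rw [hcnt', if_neg (fun h => ht h.symm), Nat.add_zero]
              simp [hkne]
          · funext t
            rw [PySem.Dict.contains_insert, hcontains_mem, List.map_append, List.map_singleton]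
            by_cases h : t = pvNk p <;> by_cases hm : t ∈ List.map pvNk S <;>
              simp [h, hm, List.contains_eq_mem, List.mem_append, hmem]
          · intro t
            by_cases h : t = pvNk p
            · subst h
              rw [PySem.Dict.getD_insert_self, ownerSpec_append_self, if_neg hc0]
            · rw [PySem.Dict.getD_insert_of_ne _ _ _ h, hgetD, ownerSpec_append_ne _ _ _ h]
        · -- third or later occurrence: no change
          have hown : F.2.getD (pvNk p) none = none := by
            rw [hgetD]
            unfold pvOwnerSpec
            rw [if_neg (by simpa using hc1)]
          have hstep : pvBStep F p = F := by
            simp [pvBStep, hcf, hown]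
          rw [hstep]
          refine ⟨?_, ?_, ?_⟩
          · rw [hres]
            unfold pvKept
            rw [List.filter_append]
            have hpnot : [p].filter (fun q => ((S ++ [p]).map pvNk).count (pvNk q) == 1) = [] := by
              have : ¬ ((S.map pvNk).count (pvNk p) + 1 = 1) := by omega
              have hb0 : ((S.map pvNk).count (pvNk p) == 0) = false := by simpa using hc0
              simp [List.filter, hcnt', hb0]
            rw [hpnot, List.append_nil]
            apply List.filter_congr
            intro q hq
            by_cases ht : pvNk q = pvNk p
            · have h2 : 2 ≤ (S.map pvNk).count (pvNk p) := by
                rcases Nat.lt_or_ge ((S.map pvNk).count (pvNk p)) 2 with h | h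
                · interval_cases h' : (S.map pvNk).count (pvNk p) <;> simp_all
                · exact h
              rw [hcnt', if_pos ht.symm, ht]
              have ha : ¬ ((S.map pvNk).count (pvNk p) = 1) := hc1
              have hb : ¬ ((S.map pvNk).count (pvNk p) + 1 = 1) := by omega
              simp [ha]
              omega
            · rw [hcnt', if_neg (fun h => ht h.symm), Nat.add_zero]
          · funext t
            rw [hcontains_mem, List.map_append, List.map_singleton]
            by_cases h : t = pvNk p <;> by_cases hm : t ∈ List.map pvNk S <;>
              simp [h, hm, List.contains_eq_mem, List.mem_append, hmem]
          · intro t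
            by_cases h : t = pvNk p
            · subst h
              rw [hown, ownerSpec_append_self, if_neg hc0]
            · rw [hgetD, ownerSpec_append_ne _ _ _ h]

theorem B_eq_kept (r : List (Int × List Int)) :
    clean_update_indexes_rule_alt r
      = pvKept ((PySem.Dict.ofList r).items.filter (fun p => p.2.length == 1)) := by
  unfold clean_update_indexes_rule_alt
  dsimp only
  have hk : (PySem.Dict.ofList r).keys.Nodup := PySem.Dict.nodup_keys_ofList r
  set d := PySem.Dict.ofList r with hd
  set S := d.items.filter (fun p => p.2.length == 1) with hS
  have hSnd : (S.map Prod.fst).Nodup := by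
    have hsub : List.Sublist (S.map Prod.fst) (d.items.map Prod.fst) := (List.filter_sublist).map Prod.fst
    exact (show (d.items.map Prod.fst).Nodup from hk).sublist hsub
  have hfold : d.items.foldl (fun st p =>
      if p.2.length == 1 then
        let t := PySem.List.pyGetD p.2 0 0
        if !(st.2.contains t) then
          (st.1.insert p.1 p.2, st.2.insert t (some p.1))
        else
          match st.2.getD t none with
          | some prev => (st.1.erase prev, st.2.insert t none)
          | none => st
      else st)
      ((PySem.Dict.empty : PySem.Dict Int (List Int)),
       (PySem.Dict.empty : PySem.Dict Int (Option Int)))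
      = S.foldl pvBStep (PySem.Dict.empty, PySem.Dict.empty) := by
    rw [hS, List.foldl_filter]
    rfl
  rw [hfold]
  exact (online_inv S hSnd).1

-- ===== VERDICT (by name: the statement is the Claim_ definition above) =====
theorem clean_update_indexes_rule_spec : Claim_equal_clean_update_indexes_rule := by
  intro r _
  unfold Spec_clean_update_indexes_rule
  rw [A_eq_kept, B_eq_kept]
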